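-- pv_equiv track=rewrite | github.com/BrooksResearchGroup-UM/ALF_CpHMD | cphmd/core/bias_guesser.py | _context_site_indices
-- ===== SOURCE A (Python) =====
-- def _context_site_indices(
--     target_site_idx: int,
--     site_keep_segids: list[tuple[str, ...]],
-- ) -> list[int]:
--     """Sites retained in the same segment context as the target site."""
--     target = set(site_keep_segids[target_site_idx])
--     return [
--         site_idx for site_idx, segids in enumerate(site_keep_segids) if target.intersection(segids)
--     ]
-- ===== SOURCE B (Python) =====
-- def _context_site_indices(
--     target_site_idx: int,
--     site_keep_segids: list,
-- ) -> list:
--     """Sites retained in the same segment context as the target site.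
--
--     Inverted-index formulation: map each segid to the site indices that
--     carry it, then gather the union over the target site's segids."""
--     index = {}
--     i = 0
--     for segids in site_keep_segids:
--         for s in segids:
--             index[s] = index.get(s, []) + [i]
--         i += 1
--     gathered = set()
--     for s in site_keep_segids[target_site_idx]:
--         gathered.update(index.get(s, []))
--     return sorted(gathered)
-- ===== Notes on version B (the rewrite author's own statement) =====
-- stated objective: alternative
-- what changed: Replaces per-site set-intersection testing over enumerate with an inverted index segid->site indices built in one pass, then gathers the union of index lists for the target's segids into a set and sorts it.
import Mathlib
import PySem

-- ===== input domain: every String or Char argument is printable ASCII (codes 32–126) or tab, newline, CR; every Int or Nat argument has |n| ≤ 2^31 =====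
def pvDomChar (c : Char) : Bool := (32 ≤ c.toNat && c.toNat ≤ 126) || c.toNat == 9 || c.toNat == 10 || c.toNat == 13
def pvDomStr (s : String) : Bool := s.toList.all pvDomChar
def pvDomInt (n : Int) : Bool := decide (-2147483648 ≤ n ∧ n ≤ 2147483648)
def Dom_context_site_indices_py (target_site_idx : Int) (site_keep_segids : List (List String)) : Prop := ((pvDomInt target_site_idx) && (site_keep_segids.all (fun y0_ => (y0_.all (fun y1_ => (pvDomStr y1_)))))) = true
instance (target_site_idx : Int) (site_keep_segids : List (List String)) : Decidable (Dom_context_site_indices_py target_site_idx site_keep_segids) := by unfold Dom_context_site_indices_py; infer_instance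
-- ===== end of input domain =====

-- B replaces per-site intersection testing with an inverted index segid → site indices,
-- gathered over the target's segids and sorted (objective: alternative decomposition).

-- ===== PORT A =====
-- the list comprehension over enumerate(site_keep_segids), index counter i
def aLoop (target : PySem.Set String) : Int → List (List String) → List Int
  | _, [] => []
  | i, segids :: rest =>
    (if PySem.Set.inter target segids ≠ [] then [i] else []) ++ aLoop target (i + 1) rest

def context_site_indices_py (target_site_idx : Int) (site_keep_segids : List (List String)) : List Int :=
  match PySem.List.pyGet? site_keep_segids target_site_idx with
  | none => []  -- Python raises IndexError here; excluded by Pre_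
  | some row => aLoop (PySem.Set.ofList row) 0 site_keep_segids

-- ===== PORT B =====
-- 'for segids in …: for s in segids: index[s] = index.get(s, []) + [i]; i += 1'
def buildIndex : Int → List (List String) → PySem.Dict String (List Int) → PySem.Dict String (List Int)
  | _, [], d => d
  | i, segids :: rest, d =>
      buildIndex (i + 1) rest (segids.foldl (fun d s => d.insert s (d.getD s [] ++ [i])) d)

def context_site_indices_py_alt (target_site_idx : Int) (site_keep_segids : List (List String)) : List Int :=
  let index := buildIndex 0 site_keep_segids PySem.Dict.empty
  match PySem.List.pyGet? site_keep_segids target_site_idx with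
  | none => []  -- Python raises IndexError here; excluded by Pre_
  | some row =>
      let gathered := row.foldl (fun g s => PySem.Set.update g (index.getD s [])) PySem.Set.empty
      PySem.List.sorted gathered (fun x => x) false

-- ===== PRECONDITION & SPEC =====
-- Pre_ excludes exactly the inputs where Python A raises IndexError (target index out of range)
def Pre_context_site_indices_py (target_site_idx : Int) (site_keep_segids : List (List String)) : Prop :=
  PySem.Raise.InRange site_keep_segids.length target_site_idx
instance (target_site_idx : Int) (site_keep_segids : List (List String)) : Decidable (Pre_context_site_indices_py target_site_idx site_keep_segids) := by unfold Pre_context_site_indices_py; infer_instance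

def pvWitness_context_site_indices_py : Int × List (List String) := (0, [["A"], ["B", "A"]])

def Spec_context_site_indices_py (target_site_idx : Int) (site_keep_segids : List (List String)) (out : List Int) : Prop := out = context_site_indices_py_alt target_site_idx site_keep_segids
instance (target_site_idx : Int) (site_keep_segids : List (List String)) (out : List Int) : Decidable (Spec_context_site_indices_py target_site_idx site_keep_segids out) := by unfold Spec_context_site_indices_py; infer_instance

-- ===== CLAIM (what is proved, stated in full; the proofs are below) =====
def Claim_equal_context_site_indices_py : Prop := ∀ (target_site_idx : Int) (site_keep_segids : List (List String)), Dom_context_site_indices_py target_site_idx site_keep_segids → Pre_context_site_indices_py target_site_idx site_keep_segids → Spec_context_site_indices_py target_site_idx site_keep_segids (context_site_indices_py target_site_idx site_keep_segids)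

-- ===== LEMMAS AND PROOFS =====

theorem mem_aLoop (target : PySem.Set String) (rest : List (List String)) (i j : Int) :
    j ∈ aLoop target i rest ↔
      ∃ k : Nat, ∃ h : k < rest.length, j = i + k ∧ PySem.Set.inter target rest[k] ≠ [] := by
  induction rest generalizing i with
  | nil => simp [aLoop]
  | cons hd tl ih =>
    simp only [aLoop, List.mem_append, ih (i + 1)]
    by_cases hne : PySem.Set.inter target hd ≠ []
    · simp only [if_pos hne, List.mem_singleton]
      constructor
      · rintro (rfl | ⟨k, hk, rfl, h⟩)
        · exact ⟨0, by simp, by simp, by simpa using hne⟩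
        · exact ⟨k + 1, by simpa using hk, by push_cast; ring, by simpa using h⟩
      · rintro ⟨k, hk, rfl, h⟩
        cases k with
        | zero => left; simp
        | succ m =>
          right; exact ⟨m, by simpa using hk, by push_cast; ring, by simpa using h⟩
    · simp only [if_neg hne, List.not_mem_nil, false_or]
      rw [not_ne_iff] at hne
      constructor
      · rintro ⟨k, hk, rfl, h⟩
        exact ⟨k + 1, by simpa using hk, by push_cast; ring, by simpa using h⟩
      · rintro ⟨k, hk, rfl, h⟩
        cases k with
        | zero => simp only [List.getElem_cons_zero] at h; exact absurd hne h
        | succ m =>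
          exact ⟨m, by simpa using hk, by push_cast; ring, by simpa using h⟩

theorem aLoop_lb (target : PySem.Set String) (rest : List (List String)) (i j : Int)
    (h : j ∈ aLoop target i rest) : i ≤ j := by
  rw [mem_aLoop] at h
  rcases h with ⟨k, hk, rfl, -⟩
  omega

theorem aLoop_pairwise (target : PySem.Set String) (rest : List (List String)) (i : Int) :
    (aLoop target i rest).Pairwise (· < ·) := by
  induction rest generalizing i with
  | nil => simp [aLoop]
  | cons hd tl ih =>
    simp only [aLoop]
    refine List.pairwise_append.2 ⟨?_, ih (i + 1), ?_⟩
    · split <;> simp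
    · intro a ha b hb
      split at ha
      · simp only [List.mem_singleton] at ha
        have hb' := aLoop_lb target tl (i + 1) b hb
        omega
      · simp at ha

theorem mem_innerFold (segids : List String) (d : PySem.Dict String (List Int)) (s : String)
    (i j : Int) :
    j ∈ (segids.foldl (fun d s => d.insert s (d.getD s [] ++ [i])) d).getD s [] ↔
      j ∈ d.getD s [] ∨ (s ∈ segids ∧ j = i) := by
  induction segids generalizing d with
  | nil => simp
  | cons hd tl ih =>
    simp only [List.foldl_cons, ih, PySem.Dict.getD_insert]
    by_cases hs : s = hd
    · subst hs; simp; tauto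
    · simp [hs]

theorem mem_buildIndex (rows : List (List String)) (i : Int)
    (d : PySem.Dict String (List Int)) (s : String) (j : Int) :
    j ∈ (buildIndex i rows d).getD s [] ↔
      j ∈ d.getD s [] ∨ ∃ k : Nat, ∃ h : k < rows.length, s ∈ rows[k] ∧ j = i + k := by
  induction rows generalizing i d with
  | nil => simp [buildIndex]
  | cons hd tl ih =>
    simp only [buildIndex, ih, mem_innerFold]
    constructor
    · rintro ((h | ⟨hs, rfl⟩) | ⟨k, hk, hs, rfl⟩)
      · exact Or.inl h
      · exact Or.inr ⟨0, by simp, by simpa using hs, by simp⟩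
      · exact Or.inr ⟨k + 1, by simpa using hk, by simpa using hs, by push_cast; ring⟩
    · rintro (h | ⟨k, hk, hs, rfl⟩)
      · exact Or.inl (Or.inl h)
      · cases k with
        | zero => exact Or.inl (Or.inr ⟨by simpa using hs, by simp⟩)
        | succ m =>
          exact Or.inr ⟨m, by simpa using hk, by simpa using hs, by push_cast; ring⟩

theorem mem_gatherFold (row : List String) (index : PySem.Dict String (List Int))
    (g : PySem.Set Int) (j : Int) :
    j ∈ row.foldl (fun g s => PySem.Set.update g (index.getD s [])) g ↔
      j ∈ g ∨ ∃ s ∈ row, j ∈ index.getD s [] := by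
  induction row generalizing g with
  | nil => simp
  | cons hd tl ih =>
    simp only [List.foldl_cons, ih, PySem.Set.mem_update, List.mem_cons]
    constructor
    · rintro ((h | h) | ⟨s, hs, h⟩)
      · exact Or.inl h
      · exact Or.inr ⟨hd, Or.inl rfl, h⟩
      · exact Or.inr ⟨s, Or.inr hs, h⟩
    · rintro (h | ⟨s, (rfl | hs), h⟩)
      · exact Or.inl (Or.inl h)
      · exact Or.inl (Or.inr h)
      · exact Or.inr ⟨s, hs, h⟩

theorem nodup_gatherFold (row : List String) (index : PySem.Dict String (List Int))
    (g : PySem.Set Int) (hg : g.Nodup) :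
    (row.foldl (fun g s => PySem.Set.update g (index.getD s [])) g).Nodup := by
  induction row generalizing g with
  | nil => simpa
  | cons hd tl ih => exact ih _ (PySem.Set.nodup_update _ _ hg)

theorem inter_ofList_ne_nil (row seg : List String) :
    PySem.Set.inter (PySem.Set.ofList row) seg ≠ [] ↔ ∃ s, s ∈ row ∧ s ∈ seg := by
  rw [Ne, List.eq_nil_iff_forall_not_mem]
  push Not
  constructor
  · rintro ⟨x, hx⟩
    rw [PySem.Set.mem_inter] at hx
    exact ⟨x, (PySem.Set.mem_ofList _ _).1 hx.1, hx.2⟩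
  · rintro ⟨s, hs, hseg⟩
    exact ⟨s, (PySem.Set.mem_inter _ _ _).2 ⟨(PySem.Set.mem_ofList _ _).2 hs, hseg⟩⟩

-- ===== VERDICT (by name: the statement is the Claim_ definition above) =====
theorem context_site_indices_py_spec : Claim_equal_context_site_indices_py := by
  intro t xs _hdom hpre
  unfold Spec_context_site_indices_py context_site_indices_py context_site_indices_py_alt
  cases hget : PySem.List.pyGet? xs t with
  | none =>
    exfalso
    exact ((PySem.List.pyGet?_eq_none_iff _ _).1 hget) hpre
  | some row =>
    symm
    apply PySem.List.sorted_eq_of_perm_of_pairwise_lt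
    · -- permutation: same members, both nodup
      rw [List.perm_ext_iff_of_nodup]
      · intro j
        rw [mem_aLoop, mem_gatherFold]
        simp only [mem_buildIndex, PySem.Dict.getD_empty, PySem.Set.empty, List.not_mem_nil, false_or]
        constructor
        · rintro ⟨k, hk, rfl, hne⟩
          rcases (inter_ofList_ne_nil row xs[k]).1 hne with ⟨s, hs, hseg⟩
          exact ⟨s, hs, k, hk, hseg, by simp⟩
        · rintro ⟨s, hs, k, hk, hseg, rfl⟩
          exact ⟨k, hk, rfl, (inter_ofList_ne_nil row xs[k]).2 ⟨s, hs, hseg⟩⟩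
      · exact (aLoop_pairwise _ _ _).imp ne_of_lt
      · exact nodup_gatherFold _ _ _ (by simp [PySem.Set.empty])
    · exact aLoop_pairwise _ _ _
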